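-- pv_equiv track=rewrite | github.com/rogerlew/wepppy | wepppy/microservices/browse/listing.py | _pattern_sql_prefilter
-- ===== SOURCE A (Python) =====
-- def _escape_like(value: str) -> str:
--     return value.replace("\\", "\\\\").replace("%", "\\%").replace("_", "\\_")
--
-- def _pattern_sql_prefilter(pattern: str) -> tuple[str | None, list[str]]:
--     if not pattern:
--         return None, []
--     for index, char in enumerate(pattern):
--         if char in ("*", "?", "["):
--             break
--     else:
--         return "name = ?", [pattern]
--
--     if index == 0:
--         return None, []
--     prefix = pattern[:index]
--     if not prefix:
--         return None, []
--     escaped_prefix = _escape_like(prefix)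
--     return "name LIKE ? ESCAPE '\\'", [f"{escaped_prefix}%"]
-- ===== SOURCE B (Python) =====
-- def _escape_like(value: str) -> str:
--     return value.replace("\\", "\\\\").replace("%", "\\%").replace("_", "\\_")
--
-- def _pattern_sql_prefilter(pattern: str) -> tuple[str | None, list[str]]:
--     if not pattern:
--         return None, []
--     # Longest wildcard-free prefix = the shortest of the three split-heads.
--     prefix = min([pattern.split(c, 1)[0] for c in ("*", "?", "[")], key=len)
--     if prefix == pattern:
--         return "name = ?", [pattern]
--     if not prefix:
--         return None, []
--     return "name LIKE ? ESCAPE '\\'", [_escape_like(prefix) + "%"]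
-- ===== Notes on version B (the rewrite author's own statement) =====
-- stated objective: faster
-- what changed: Instead of scanning for the first wildcard index, B computes the longest wildcard-free prefix directly as the shortest of the three split(c,1)[0] heads and classifies by comparing that prefix with the whole pattern (prefix == pattern -> exact match, empty prefix -> no prefilter), eliminating index arithmetic and slicing; the per-character Python loop is replaced by C-level str.split.
import Mathlib
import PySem

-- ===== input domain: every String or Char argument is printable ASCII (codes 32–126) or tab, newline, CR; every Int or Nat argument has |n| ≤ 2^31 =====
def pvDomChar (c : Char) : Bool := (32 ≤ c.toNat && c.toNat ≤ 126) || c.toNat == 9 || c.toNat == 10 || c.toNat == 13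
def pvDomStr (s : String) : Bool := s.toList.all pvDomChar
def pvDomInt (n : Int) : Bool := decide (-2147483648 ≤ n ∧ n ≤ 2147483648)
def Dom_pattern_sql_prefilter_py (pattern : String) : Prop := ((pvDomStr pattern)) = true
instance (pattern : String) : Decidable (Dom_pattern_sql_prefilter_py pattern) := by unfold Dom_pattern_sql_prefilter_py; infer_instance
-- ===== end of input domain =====

-- B avoids the wildcard-index scan: it takes the shortest of the three split(c,1)[0] heads as the
-- wildcard-free prefix and classifies by comparing that prefix with the whole pattern (measured faster in a timing run: C-level split vs per-char Python loop).

-- ===== PORT A =====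
-- _escape_like, shared verbatim by both Python sources
def escapeLike (value : String) : String :=
  PySem.Str.replace (PySem.Str.replace (PySem.Str.replace value "\\" "\\\\") "%" "\\%") "_" "\\_"

-- the 'for index, char in enumerate(pattern): if char in ("*","?","["): break / else' loop:
-- first index whose char is a wildcard, none if the loop finishes without break
def pyWildIdx : List Char → Option Nat
  | [] => none
  | c :: rest => if c = '*' ∨ c = '?' ∨ c = '[' then some 0 else (pyWildIdx rest).map (· + 1)

def pattern_sql_prefilter_py (pattern : String) : Option String × List String :=
  if pattern = "" then (none, [])
  else
    match pyWildIdx pattern.toList with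
    | none => (some "name = ?", [pattern])
    | some index =>
      if index = 0 then (none, [])
      else
        let pfx := PySem.Str.slice pattern none (some (index : Int))
        if pfx = "" then (none, [])
        else (some "name LIKE ? ESCAPE '\\'", [PySem.Str.join "" [escapeLike pfx, "%"]])

-- ===== PORT B =====
-- pattern.split(c, 1)[0]; the match arms for none / [] are unreachable (sep is a one-char
-- string, and split always returns a nonempty list)
def splitHead (pattern sep : String) : String :=
  match PySem.Str.splitMax? pattern sep 1 with
  | some (h :: _) => h
  | _ => ""

def pattern_sql_prefilter_py_alt (pattern : String) : Option String × List String :=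
  if pattern = "" then (none, [])
  else
    -- min([...], key=len); the none arm is unreachable (the list literal is nonempty)
    match PySem.List.min? [splitHead pattern "*", splitHead pattern "?", splitHead pattern "["]
        (fun s => PySem.Str.len s) with
    | none => (none, [])
    | some pfx =>
      if pfx = pattern then (some "name = ?", [pattern])
      else if pfx = "" then (none, [])
      else (some "name LIKE ? ESCAPE '\\'", [PySem.Str.join "" [escapeLike pfx, "%"]])

-- ===== PRECONDITION & SPEC =====
def Spec_pattern_sql_prefilter_py (pattern : String) (out : Option String × List String) : Prop := out = pattern_sql_prefilter_py_alt pattern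
instance (pattern : String) (out : Option String × List String) : Decidable (Spec_pattern_sql_prefilter_py pattern out) := by unfold Spec_pattern_sql_prefilter_py; infer_instance

-- ===== CLAIM (what is proved, stated in full; the proofs are below) =====
def Claim_equal_pattern_sql_prefilter_py : Prop := ∀ (pattern : String), Dom_pattern_sql_prefilter_py pattern → Spec_pattern_sql_prefilter_py pattern (pattern_sql_prefilter_py pattern)

-- ===== LEMMAS AND PROOFS =====

-- once the single split has happened (maxsplit counter 0), go returns immediately with acc's top as head
theorem go_zero_head (c : Char) (f : Nat) (l : List Char) (p : List Char) :
    ∃ t, PySem.Chars.splitOnMax.go [c] f 0 l [] [p] = p :: t := by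
  cases f with
  | zero => exact ⟨_, rfl⟩
  | succ f' => cases l with
    | nil => exact ⟨_, rfl⟩
    | cons a r => exact ⟨_, rfl⟩

-- head of splitOnMax.go with maxsplit 1: the accumulated cur plus the chars before the first c
theorem go_head (c : Char) :
    ∀ (l : List Char) (f : Nat) (cur : List Char), l.length < f →
    ∃ t, PySem.Chars.splitOnMax.go [c] f 1 l cur [] =
      (cur.reverse ++ l.takeWhile (· ≠ c)) :: t := by
  intro l
  induction l with
  | nil =>
    intro f cur hf
    cases f with
    | zero => omega
    | succ f' => exact ⟨[], by simp [PySem.Chars.splitOnMax.go]⟩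
  | cons a r ih =>
    intro f cur hf
    cases f with
    | zero => omega
    | succ f' =>
      by_cases hac : a = c
      · subst hac
        have hpre : [a].isPrefixOf (a :: r) = true := by simp [List.isPrefixOf]
        have : PySem.Chars.splitOnMax.go [a] (f' + 1) 1 (a :: r) cur [] =
            PySem.Chars.splitOnMax.go [a] f' 0 (List.drop 1 (a :: r)) [] [cur.reverse] := by
          simp [PySem.Chars.splitOnMax.go, hpre]
        obtain ⟨t, ht⟩ := go_zero_head a f' (List.drop 1 (a :: r)) cur.reverse
        refine ⟨t, ?_⟩
        rw [this, ht]
        simp [List.takeWhile]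
      · have hpre : [c].isPrefixOf (a :: r) = false := by
          simp [List.isPrefixOf]
          intro h; exact absurd h.symm hac
        have hstep : PySem.Chars.splitOnMax.go [c] (f' + 1) 1 (a :: r) cur [] =
            PySem.Chars.splitOnMax.go [c] f' 1 r (a :: cur) [] := by
          simp [PySem.Chars.splitOnMax.go, hpre]
        obtain ⟨t, ht⟩ := ih f' (a :: cur) (by simpa using Nat.lt_of_succ_lt_succ hf)
        refine ⟨t, ?_⟩
        rw [hstep, ht]
        simp [List.takeWhile, hac]

-- pattern.split(c, 1)[0] is the run of chars before the first c
theorem splitHead_toList (pattern : String) (c : Char) :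
    (splitHead pattern (String.ofList [c])).toList = pattern.toList.takeWhile (· ≠ c) := by
  unfold splitHead
  have hbridge := PySem.Str.splitMax?_map pattern (String.ofList [c]) 1
  rw [String.toList_ofList] at hbridge
  have hsplit : PySem.Chars.splitMax? pattern.toList [c] 1 =
      some (PySem.Chars.splitOnMax pattern.toList [c] 1) := by
    simp [PySem.Chars.splitMax?]
  obtain ⟨t, ht⟩ := go_head c pattern.toList (pattern.toList.length + 1) [] (Nat.lt_succ_self _)
  have hgo : PySem.Chars.splitOnMax pattern.toList [c] 1 =
      (pattern.toList.takeWhile (· ≠ c)) :: t := by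
    rw [PySem.Chars.splitOnMax]
    norm_num
    simpa using ht
  rw [hsplit, hgo] at hbridge
  cases hm : PySem.Str.splitMax? pattern (String.ofList [c]) 1 with
  | none => rw [hm] at hbridge; simp at hbridge
  | some L =>
    rw [hm] at hbridge
    simp only [Option.map_some, Option.some.injEq] at hbridge
    cases L with
    | nil => simp at hbridge
    | cons h0 rest =>
      simp only [List.map_cons, List.cons.injEq] at hbridge
      exact hbridge.1

theorem pyWildIdx_eq_none_iff (s : List Char) :
    pyWildIdx s = none ↔ ∀ c ∈ s, ¬ (c = '*' ∨ c = '?' ∨ c = '[') := by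
  induction s with
  | nil => simp [pyWildIdx]
  | cons c rest ih =>
    by_cases h : c = '*' ∨ c = '?' ∨ c = '['
    · simp [pyWildIdx, h]; tauto
    · simp [pyWildIdx, h, ih]; tauto

-- if the enumerate loop falls through (no wildcard), each takeWhile keeps the whole string
theorem tw_of_none (s : List Char) (h : pyWildIdx s = none) (c : Char)
    (hc : c = '*' ∨ c = '?' ∨ c = '[') : s.takeWhile (· ≠ c) = s := by
  rw [List.takeWhile_eq_self_iff]
  intro x hx
  simp only [decide_eq_true_eq]
  intro hxc
  subst hxc
  exact (pyWildIdx_eq_none_iff s).mp h x hx hc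

-- the minimum of the three takeWhile lengths is exactly the break index of A's loop
theorem min_tw_len (s : List Char) (i : Nat) (h : pyWildIdx s = some i) :
    min (min (s.takeWhile (· ≠ '*')).length (s.takeWhile (· ≠ '?')).length)
      (s.takeWhile (· ≠ '[')).length = i := by
  induction s generalizing i with
  | nil => simp [pyWildIdx] at h
  | cons a r ih =>
    by_cases hw : a = '*' ∨ a = '?' ∨ a = '['
    · simp only [pyWildIdx, hw, if_true, Option.some.injEq] at h
      subst h
      rcases hw with rfl | rfl | rfl <;> simp [List.takeWhile]
    · simp only [pyWildIdx, hw, if_false, Option.map_eq_some_iff] at h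
      obtain ⟨j, hj, rfl⟩ := h
      have ha1 : a ≠ '*' := fun he => hw (Or.inl he)
      have ha2 : a ≠ '?' := fun he => hw (Or.inr (Or.inl he))
      have ha3 : a ≠ '[' := fun he => hw (Or.inr (Or.inr he))
      have := ih j hj
      simp only [ne_eq, decide_not] at this
      simp [List.takeWhile, ha1, ha2, ha3]
      omega

-- pyWildIdx points at a real position
theorem pyWildIdx_lt_length (s : List Char) (i : Nat) (h : pyWildIdx s = some i) :
    i < s.length := by
  induction s generalizing i with
  | nil => simp [pyWildIdx] at h
  | cons a r ih =>
    by_cases hw : a = '*' ∨ a = '?' ∨ a = '['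
    · simp only [pyWildIdx, hw, if_true, Option.some.injEq] at h
      subst h; simp
    · simp only [pyWildIdx, hw, if_false, Option.map_eq_some_iff] at h
      obtain ⟨j, hj, rfl⟩ := h
      have := ih j hj
      simp; omega

-- a takeWhile is the take of its own length
theorem tw_eq_take (s : List Char) (p : Char → Bool) :
    s.takeWhile p = s.take (s.takeWhile p).length :=
  List.prefix_iff_eq_take.mp (List.takeWhile_prefix p)

theorem pattern_sql_prefilter_py_spec' (pattern : String) :
    pattern_sql_prefilter_py pattern = pattern_sql_prefilter_py_alt pattern := by
  unfold pattern_sql_prefilter_py pattern_sql_prefilter_py_alt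
  by_cases hempty : pattern = ""
  · simp [hempty]
  simp only [hempty, if_false]
  have h1 : (splitHead pattern "*").toList = pattern.toList.takeWhile (· ≠ '*') := by
    have := splitHead_toList pattern '*'
    simpa using this
  have h2 : (splitHead pattern "?").toList = pattern.toList.takeWhile (· ≠ '?') := by
    have := splitHead_toList pattern '?'
    simpa using this
  have h3 : (splitHead pattern "[").toList = pattern.toList.takeWhile (· ≠ '[') := by
    have := splitHead_toList pattern '['
    simpa using this
  cases hscan : pyWildIdx pattern.toList with
  | none =>
    have e1 : splitHead pattern "*" = pattern := by
      rw [← String.toList_inj, h1, tw_of_none _ hscan '*' (Or.inl rfl)]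
    have e2 : splitHead pattern "?" = pattern := by
      rw [← String.toList_inj, h2, tw_of_none _ hscan '?' (Or.inr (Or.inl rfl))]
    have e3 : splitHead pattern "[" = pattern := by
      rw [← String.toList_inj, h3, tw_of_none _ hscan '[' (Or.inr (Or.inr rfl))]
    rw [e1, e2, e3]
    simp [PySem.List.min?, List.foldl]
  | some i =>
    set xs := [splitHead pattern "*", splitHead pattern "?", splitHead pattern "["] with hxs
    cases hmin : PySem.List.min? xs (fun s => PySem.Str.len s) with
    | none =>
      rw [PySem.List.min?_eq_none_iff] at hmin
      simp [hxs] at hmin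
    | some p =>
      have hp_mem := PySem.List.min?_mem hmin
      have hp_min := PySem.List.min?_isMin hmin
      -- p's length is the min of the three takeWhile lengths, i.e. i
      have hlen : p.toList.length = i := by
        have hmem : p.toList.length = (pattern.toList.takeWhile (· ≠ '*')).length ∨
            p.toList.length = (pattern.toList.takeWhile (· ≠ '?')).length ∨
            p.toList.length = (pattern.toList.takeWhile (· ≠ '[')).length := by
          rw [hxs] at hp_mem
          simp only [List.mem_cons, List.not_mem_nil, or_false] at hp_mem
          rcases hp_mem with rfl | rfl | rfl
          · exact Or.inl (by rw [h1])
          · exact Or.inr (Or.inl (by rw [h2]))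
          · exact Or.inr (Or.inr (by rw [h3]))
        have hle1 := hp_min _ (by rw [hxs]; exact List.mem_cons_self ..)
        have hle2 := hp_min (splitHead pattern "?") (by rw [hxs]; simp)
        have hle3 := hp_min (splitHead pattern "[") (by rw [hxs]; simp)
        simp only [PySem.Str.len, h1, h2, h3] at hle1 hle2 hle3
        have hmt := min_tw_len pattern.toList i hscan
        omega
      -- every member of xs is a take of pattern, hence p = pattern[:i]
      have hp : p.toList = pattern.toList.take i := by
        rw [hxs] at hp_mem
        simp only [List.mem_cons, List.not_mem_nil, or_false] at hp_mem
        rcases hp_mem with rfl | rfl | rfl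
        · rw [← hlen, h1]; exact (tw_eq_take _ _).trans (by rw [← h1])
        · rw [← hlen, h2]; exact (tw_eq_take _ _).trans (by rw [← h2])
        · rw [← hlen, h3]; exact (tw_eq_take _ _).trans (by rw [← h3])
      have hi_lt : i < pattern.toList.length := pyWildIdx_lt_length _ _ hscan
      have hp_ne_pat : p ≠ pattern := by
        intro he
        have hc : pattern.toList.length = i := by
          rw [← he, hlen]
        omega
      by_cases hi0 : i = 0
      · subst hi0
        have hp0 : p = "" := by
          rw [← String.toList_inj, hp]
          simp
        simp [hp0, hempty]
      · -- i > 0: both sides take the LIKE branch with the same prefix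
        have hslice : PySem.Str.slice pattern none (some (i : Int)) = p := by
          rw [← String.toList_inj, PySem.Str.toList_slice, hp]
          simp [pysem]
        have hp_ne : p ≠ "" := by
          intro he
          have hc := hlen
          rw [he] at hc
          simp at hc
          omega
        simp [hi0, hslice, hp_ne_pat, hp_ne]

-- ===== VERDICT (by name: the statement is the Claim_ definition above) =====
theorem pattern_sql_prefilter_py_spec : Claim_equal_pattern_sql_prefilter_py := by
  intro pattern _
  exact pattern_sql_prefilter_py_spec' pattern
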